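-- pv_equiv track=rewrite | github.com/davidebuzzao/FunCoup6 | FunCoup/data/dataCollection/Genomes/getOrthologs.py | readSqlTable
-- ===== SOURCE A (Python) =====
-- def getPairsFromGroup(spAGenes,spBGenes,spA,spB):
--     orthologsToWrite=[]
--     for gA in spAGenes:
--         for gB in spBGenes:
--             orth=gA+"|"+gB+"|"+spA+"|"+spB
--             orthologsToWrite.append(orth)
--     return orthologsToWrite
--
-- def readSqlTable(content,spA,spB):
--     currentGroup=0
--     spAGenes=[]
--     spBGenes=[]
--     orthologsToWrite=[]
--     proteinsUsed=[]
--     for line in content: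
--         if len(line)>1:
--             groupId,bitscore,species,inparalogScore,proteinId,*seedscore=line.strip().split("\t")
--             proteinsUsed.append(proteinId)
--             if groupId!=currentGroup: # For each new group encountered, writing all pairs of orthologs to list
--                 orthologsToWrite.extend(getPairsFromGroup(spAGenes,spBGenes,spA,spB))
--                 currentGroup=groupId
--                 spAGenes=[]
--                 spBGenes=[]
--             if species.split(".")[0]==spA:
--                 spAGenes.append(proteinId.strip())
--             else:
--                 spBGenes.append(proteinId.strip())
--     orthologsToWrite.extend(getPairsFromGroup(spAGenes,spBGenes,spA,spB))
--     return orthologsToWrite,proteinsUsed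
-- ===== SOURCE B (Python) =====
-- def _groupRuns(records):
--     # consecutive runs of equal groupId (like itertools.groupby on the key)
--     if not records:
--         return []
--     groups = []
--     key = records[0][0]
--     run = [records[0]]
--     for rec in records[1:]:
--         if rec[0] == key:
--             run.append(rec)
--         else:
--             groups.append(run)
--             key = rec[0]
--             run = [rec]
--     groups.append(run)
--     return groups
--
--
-- def readSqlTable(content, spA, spB):
--     records = []
--     proteinsUsed = []
--     for line in content:
--         if len(line) > 1:
--             fields = line.strip().split("\t")
--             proteinsUsed.append(fields[4])
--             records.append((fields[0], fields[2], fields[4].strip()))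
--     orthologsToWrite = []
--     for grp in _groupRuns(records):
--         spAGenes = [pid for _, sp, pid in grp if sp.split(".")[0] == spA]
--         spBGenes = [pid for _, sp, pid in grp if sp.split(".")[0] != spA]
--         for gA in spAGenes:
--             for gB in spBGenes:
--                 orthologsToWrite.append(gA + "|" + gB + "|" + spA + "|" + spB)
--     return orthologsToWrite, proteinsUsed
-- ===== Notes on version B (the rewrite author's own statement) =====
-- stated objective: alternative
-- what changed: B replaces A's single stateful flush-on-group-change loop by a two-phase pipeline: parse all lines into (groupId, species, proteinId) records, group consecutive records by groupId, then split each run into spA/spB genes with comprehensions and emit their cross product.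
import Mathlib
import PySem

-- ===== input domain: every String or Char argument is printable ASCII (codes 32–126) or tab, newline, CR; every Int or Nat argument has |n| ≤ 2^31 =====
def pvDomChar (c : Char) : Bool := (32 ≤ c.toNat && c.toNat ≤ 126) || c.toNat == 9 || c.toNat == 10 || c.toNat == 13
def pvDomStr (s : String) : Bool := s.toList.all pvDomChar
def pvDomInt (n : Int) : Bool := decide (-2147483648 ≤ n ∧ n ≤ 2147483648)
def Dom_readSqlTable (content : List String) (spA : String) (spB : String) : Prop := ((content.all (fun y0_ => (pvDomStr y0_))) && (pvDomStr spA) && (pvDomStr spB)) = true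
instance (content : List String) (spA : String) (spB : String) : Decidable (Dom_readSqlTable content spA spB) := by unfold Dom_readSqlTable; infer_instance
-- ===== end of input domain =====

-- B re-decomposes A's flush-on-group-change loop into parse-records / group-consecutive-runs / emit-cross-products; equal return values on Pre_ (no speed claim).

-- ===== PORT A =====
-- s.split(sep) for a nonempty sep: PySem.Str.split? is `some` whenever sep ≠ "" (here sep is "\t" or ".")
def pySplit (s sep : String) : List String := (PySem.Str.split? s sep).getD []

def getPairsFromGroup (spAGenes spBGenes : List String) (spA spB : String) : List String :=
  spAGenes.foldl (fun acc gA =>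
    spBGenes.foldl (fun acc2 gB => acc2 ++ [gA ++ "|" ++ gB ++ "|" ++ spA ++ "|" ++ spB]) acc) []

-- A's loop body; currentGroup is `Option String`: Python's initial int 0 compares unequal to every groupId string, exactly like `none`.
def stepA (spA spB : String)
    (s : Option String × List String × List String × List String × List String) (line : String) :
    Option String × List String × List String × List String × List String :=
  if 1 < PySem.Str.len line then
    let fields := pySplit (PySem.Str.strip line) "\t"
    let groupId := fields.getD 0 ""
    let species := fields.getD 2 ""
    let proteinId := fields.getD 4 ""
    let used := s.2.2.2.2 ++ [proteinId]
    let t : Option String × List String × List String × List String :=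
      if s.1 ≠ some groupId then
        (some groupId, [], [], s.2.2.2.1 ++ getPairsFromGroup s.2.1 s.2.2.1 spA spB)
      else (s.1, s.2.1, s.2.2.1, s.2.2.2.1)
    if (pySplit species ".").getD 0 "" == spA then
      (t.1, t.2.1 ++ [PySem.Str.strip proteinId], t.2.2.1, t.2.2.2, used)
    else
      (t.1, t.2.1, t.2.2.1 ++ [PySem.Str.strip proteinId], t.2.2.2, used)
  else s

def readSqlTable (content : List String) (spA : String) (spB : String) : List String × List String :=
  let fin := content.foldl (stepA spA spB) (none, [], [], [], [])
  (fin.2.2.2.1 ++ getPairsFromGroup fin.2.1 fin.2.2.1 spA spB, fin.2.2.2.2)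

-- ===== PORT B =====
-- _groupRuns: consecutive runs of equal groupId, the loop as structural recursion over (key, run, groups)
def groupRunsGo (key : String) (run : List (String × String × String))
    (groups : List (List (String × String × String))) :
    List (String × String × String) → List (List (String × String × String))
  | [] => groups ++ [run]
  | r :: rs =>
    if r.1 == key then groupRunsGo key (run ++ [r]) groups rs
    else groupRunsGo r.1 [r] (groups ++ [run]) rs

def groupRuns : List (String × String × String) → List (List (String × String × String))
  | [] => []
  | r :: rs => groupRunsGo r.1 [r] [] rs

def readSqlTable_alt (content : List String) (spA : String) (spB : String) : List String × List String :=
  let parsed := content.foldl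
    (fun (acc : List (String × String × String) × List String) line =>
      if 1 < PySem.Str.len line then
        let fields := pySplit (PySem.Str.strip line) "\t"
        (acc.1 ++ [(fields.getD 0 "", fields.getD 2 "", PySem.Str.strip (fields.getD 4 ""))],
         acc.2 ++ [fields.getD 4 ""])
      else acc) ([], [])
  let orths := (groupRuns parsed.1).flatMap (fun grp =>
    let spAGenes := (grp.filter (fun r => (pySplit r.2.1 ".").getD 0 "" == spA)).map (fun r => r.2.2)
    let spBGenes := (grp.filter (fun r => !((pySplit r.2.1 ".").getD 0 "" == spA))).map (fun r => r.2.2)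
    spAGenes.flatMap (fun gA => spBGenes.map (fun gB => gA ++ "|" ++ gB ++ "|" ++ spA ++ "|" ++ spB)))
  (orths, parsed.2)

-- ===== PRECONDITION & SPEC =====
-- Pre_ excludes exactly the inputs where Python A raises: a line of length > 1 whose stripped
-- tab-split has fewer than 5 fields makes A's unpacking raise ValueError (and B raise IndexError).
def Pre_readSqlTable (content : List String) (spA : String) (spB : String) : Prop :=
  ∀ line ∈ content, 1 < PySem.Str.len line →
    5 ≤ (pySplit (PySem.Str.strip line) "\t").length
instance (content : List String) (spA : String) (spB : String) : Decidable (Pre_readSqlTable content spA spB) := by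
  unfold Pre_readSqlTable; infer_instance

def pvWitness_readSqlTable : List String × String × String :=
  (["1\t50\t9606.X\t0.5\tP1", "1\t40\t10090.Y\t0.5\tP2", "2\t30\t9606.Z\t0.5\tP3"], "9606", "10090")

def Spec_readSqlTable (content : List String) (spA : String) (spB : String) (out : List String × List String) : Prop := out = readSqlTable_alt content spA spB
instance (content : List String) (spA : String) (spB : String) (out : List String × List String) : Decidable (Spec_readSqlTable content spA spB out) := by unfold Spec_readSqlTable; infer_instance

-- ===== CLAIM (what is proved, stated in full; the proofs are below) =====
def Claim_equal_readSqlTable : Prop := ∀ (content : List String) (spA : String) (spB : String), Dom_readSqlTable content spA spB → Pre_readSqlTable content spA spB → Spec_readSqlTable content spA spB (readSqlTable content spA spB)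

-- ===== LEMMAS AND PROOFS =====

-- proof-side views of one parsed line / of the record stream
def lineRec (line : String) : String × String × String :=
  let fields := pySplit (PySem.Str.strip line) "\t"
  (fields.getD 0 "", fields.getD 2 "", PySem.Str.strip (fields.getD 4 ""))

def linePid (line : String) : String :=
  (pySplit (PySem.Str.strip line) "\t").getD 4 ""

def recsOf (content : List String) : List (String × String × String) :=
  content.flatMap (fun l => if 1 < PySem.Str.len l then [lineRec l] else [])

def usedOf (content : List String) : List String :=
  content.flatMap (fun l => if 1 < PySem.Str.len l then [linePid l] else [])

def isA (spA : String) (r : String × String × String) : Bool :=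
  (pySplit r.2.1 ".").getD 0 "" == spA

def aOf (spA : String) (grp : List (String × String × String)) : List String :=
  (grp.filter (isA spA)).map (fun r => r.2.2)

def bOf (spA : String) (grp : List (String × String × String)) : List String :=
  (grp.filter (fun r => !isA spA r)).map (fun r => r.2.2)

def emitG (spA spB : String) (grp : List (String × String × String)) : List String :=
  (aOf spA grp).flatMap (fun gA => (bOf spA grp).map (fun gB => gA ++ "|" ++ gB ++ "|" ++ spA ++ "|" ++ spB))

lemma getPairs_inner (spA spB gA : String) (bG acc : List String) :
    bG.foldl (fun acc2 gB => acc2 ++ [gA ++ "|" ++ gB ++ "|" ++ spA ++ "|" ++ spB]) acc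
      = acc ++ bG.map (fun gB => gA ++ "|" ++ gB ++ "|" ++ spA ++ "|" ++ spB) :=
  PySem.List.foldl_append_singleton_eq_map _ _ _

lemma getPairs_eq_aux (spA spB : String) (aG bG acc : List String) :
    aG.foldl (fun acc gA =>
      bG.foldl (fun acc2 gB => acc2 ++ [gA ++ "|" ++ gB ++ "|" ++ spA ++ "|" ++ spB]) acc) acc
      = acc ++ aG.flatMap (fun gA => bG.map (fun gB => gA ++ "|" ++ gB ++ "|" ++ spA ++ "|" ++ spB)) := by
  induction aG generalizing acc with
  | nil => simp
  | cons gA aG ih =>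
    rw [List.foldl_cons, getPairs_inner, ih, List.flatMap_cons, List.append_assoc]

lemma getPairs_eq (spA spB : String) (aG bG : List String) :
    getPairsFromGroup aG bG spA spB
      = aG.flatMap (fun gA => bG.map (fun gB => gA ++ "|" ++ gB ++ "|" ++ spA ++ "|" ++ spB)) := by
  rw [getPairsFromGroup, getPairs_eq_aux]
  rw [List.nil_append]

lemma groupRunsGo_acc (rs : List (String × String × String)) (key : String)
    (run : List (String × String × String)) (gs : List (List (String × String × String))) :
    groupRunsGo key run gs rs = gs ++ groupRunsGo key run [] rs := by
  induction rs generalizing key run gs with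
  | nil => simp [groupRunsGo]
  | cons r rs ih =>
    by_cases h : (r.1 == key) = true
    · simp only [groupRunsGo, if_pos h]
      rw [ih key (run ++ [r]) gs]
    · simp only [groupRunsGo, if_neg h]
      rw [ih r.1 [r] (gs ++ [run]), ih r.1 [r] ([] ++ [run])]
      simp

lemma aOf_append (spA : String) (run : List (String × String × String)) (r : String × String × String) :
    aOf spA (run ++ [r]) = aOf spA run ++ (if isA spA r then [r.2.2] else []) := by
  by_cases h : isA spA r <;> simp [aOf, List.filter_append, h]

lemma bOf_append (spA : String) (run : List (String × String × String)) (r : String × String × String) :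
    bOf spA (run ++ [r]) = bOf spA run ++ (if isA spA r then [] else [r.2.2]) := by
  by_cases h : isA spA r <;> simp [bOf, List.filter_append, h]

-- A's step on a parsed line, written over the record view of that line
lemma stepA_rec (spA spB line : String) (cur : Option String) (aG bG orth used : List String)
    (hl : 1 < PySem.Str.len line) :
    stepA spA spB (cur, aG, bG, orth, used) line =
      if isA spA (lineRec line) then
        (if cur ≠ some (lineRec line).1 then
          (some (lineRec line).1, [(lineRec line).2.2], [],
           orth ++ getPairsFromGroup aG bG spA spB, used ++ [linePid line])
        else (cur, aG ++ [(lineRec line).2.2], bG, orth, used ++ [linePid line]))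
      else
        (if cur ≠ some (lineRec line).1 then
          (some (lineRec line).1, [], [(lineRec line).2.2],
           orth ++ getPairsFromGroup aG bG spA spB, used ++ [linePid line])
        else (cur, aG, bG ++ [(lineRec line).2.2], orth, used ++ [linePid line])) := by
  have hl' : 1 < line.length := by simpa using hl
  by_cases hA : isA spA (lineRec line) = true <;>
    by_cases hc : cur = some (lineRec line).1 <;>
      simp [stepA, lineRec, linePid, isA] at hA hc ⊢ <;>
        simp [hA, hc, hl']

-- main invariant: from a mid-run state, A's remaining fold + final flush produces B's grouped emissions
lemma A_run (spA spB : String) (rest : List String) (key : String)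
    (run : List (String × String × String)) (orth used : List String) :
    (let fin := rest.foldl (stepA spA spB) (some key, aOf spA run, bOf spA run, orth, used)
     (fin.2.2.2.1 ++ getPairsFromGroup fin.2.1 fin.2.2.1 spA spB, fin.2.2.2.2))
      = (orth ++ (groupRunsGo key run [] (recsOf rest)).flatMap (emitG spA spB),
         used ++ usedOf rest) := by
  induction rest generalizing key run orth used with
  | nil =>
    simp [recsOf, usedOf, groupRunsGo, emitG, getPairs_eq]
  | cons line rest ih =>
    by_cases hl : 1 < PySem.Str.len line
    · have hl' : 1 < line.length := by simpa using hl
      have hrecs : recsOf (line :: rest) = lineRec line :: recsOf rest := by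
        simp [recsOf, hl']
      have hused : usedOf (line :: rest) = linePid line :: usedOf rest := by
        simp [usedOf, hl']
      by_cases hk : ((lineRec line).1 == key) = true
      · -- same group: the run extends
        have hkey : (lineRec line).1 = key := by simpa using hk
        have hcond : ¬ (some key ≠ some (lineRec line).1) := by simp [hkey]
        simp only [List.foldl_cons, stepA_rec spA spB line _ _ _ _ _ hl, if_neg hcond]
        by_cases hA : isA spA (lineRec line) = true
        · simp only [if_pos hA]
          rw [show aOf spA run ++ [(lineRec line).2.2] = aOf spA (run ++ [lineRec line]) by
                simp [aOf_append, hA],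
              show bOf spA run = bOf spA (run ++ [lineRec line]) by simp [bOf_append, hA]]
          rw [ih key (run ++ [lineRec line]) orth (used ++ [linePid line])]
          simp only [hrecs, hused, groupRunsGo, if_pos hk]
          simp [List.append_assoc]
        · simp only [if_neg hA]
          rw [show bOf spA run ++ [(lineRec line).2.2] = bOf spA (run ++ [lineRec line]) by
                simp [bOf_append, hA],
              show aOf spA run = aOf spA (run ++ [lineRec line]) by simp [aOf_append, hA]]
          rw [ih key (run ++ [lineRec line]) orth (used ++ [linePid line])]
          simp only [hrecs, hused, groupRunsGo, if_pos hk]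
          simp [List.append_assoc]
      · -- new group: flush and start a new run
        have hcond : some key ≠ some (lineRec line).1 := by
          intro h; exact (by simpa using hk : ¬ (lineRec line).1 = key) (Option.some.inj h).symm
        simp only [List.foldl_cons, stepA_rec spA spB line _ _ _ _ _ hl, if_pos hcond]
        have main := ih (lineRec line).1 [lineRec line]
            (orth ++ getPairsFromGroup (aOf spA run) (bOf spA run) spA spB) (used ++ [linePid line])
        simp only at main
        by_cases hA : isA spA (lineRec line) = true
        · have ha : aOf spA [lineRec line] = [(lineRec line).2.2] := by simp [aOf, hA]
          have hb : bOf spA [lineRec line] = ([] : List String) := by simp [bOf, hA]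
          rw [ha, hb] at main
          simp only [if_pos hA]
          rw [main, hrecs, hused]
          simp only [groupRunsGo, if_neg hk]
          rw [groupRunsGo_acc (recsOf rest) (lineRec line).1 [lineRec line] ([] ++ [run])]
          simp [getPairs_eq, emitG, List.append_assoc]
        · have ha : aOf spA [lineRec line] = ([] : List String) := by simp [aOf, hA]
          have hb : bOf spA [lineRec line] = [(lineRec line).2.2] := by simp [bOf, hA]
          rw [ha, hb] at main
          simp only [if_neg hA]
          rw [main, hrecs, hused]
          simp only [groupRunsGo, if_neg hk]
          rw [groupRunsGo_acc (recsOf rest) (lineRec line).1 [lineRec line] ([] ++ [run])]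
          simp [getPairs_eq, emitG, List.append_assoc]
    · have hl' : ¬ 1 < line.length := by simpa using hl
      simp only [List.foldl_cons, stepA, if_neg hl]
      rw [ih key run orth used]
      simp [recsOf, usedOf, hl']

-- A from its initial state: skip lines until the first record, then A_run
lemma A_start (spA spB : String) (content : List String) :
    readSqlTable content spA spB
      = ((groupRuns (recsOf content)).flatMap (emitG spA spB), usedOf content) := by
  induction content with
  | nil => simp [readSqlTable, recsOf, usedOf, groupRuns, getPairsFromGroup]
  | cons line rest ih =>
    by_cases hl : 1 < PySem.Str.len line
    · have hl' : 1 < line.length := by simpa using hl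
      have hcond : (none : Option String) ≠ some (lineRec line).1 := by simp
      simp only [readSqlTable, List.foldl_cons, stepA_rec spA spB line _ _ _ _ _ hl,
        if_pos hcond]
      have main := A_run spA spB rest (lineRec line).1 [lineRec line] [] [linePid line]
      simp only at main
      by_cases hA : isA spA (lineRec line) = true
      · have ha : aOf spA [lineRec line] = [(lineRec line).2.2] := by simp [aOf, hA]
        have hb : bOf spA [lineRec line] = ([] : List String) := by simp [bOf, hA]
        rw [ha, hb] at main
        simp only [if_pos hA]
        simp only [show getPairsFromGroup ([] : List String) ([] : List String) spA spB = [] from rfl,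
          List.nil_append]
        rw [main]
        simp [recsOf, usedOf, hl', groupRuns]
      · have ha : aOf spA [lineRec line] = ([] : List String) := by simp [aOf, hA]
        have hb : bOf spA [lineRec line] = [(lineRec line).2.2] := by simp [bOf, hA]
        rw [ha, hb] at main
        simp only [if_neg hA]
        simp only [show getPairsFromGroup ([] : List String) ([] : List String) spA spB = [] from rfl,
          List.nil_append]
        rw [main]
        simp [recsOf, usedOf, hl', groupRuns]
    · have hl' : ¬ 1 < line.length := by simpa using hl
      simp only [readSqlTable, List.foldl_cons, stepA, if_neg hl] at ih ⊢
      rw [ih]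
      simp [recsOf, usedOf, hl']

-- B's parse loop accumulates exactly (recsOf, usedOf)
lemma B_parse (content : List String) (rs : List (String × String × String)) (us : List String) :
    content.foldl
      (fun (acc : List (String × String × String) × List String) line =>
        if 1 < PySem.Str.len line then
          let fields := pySplit (PySem.Str.strip line) "\t"
          (acc.1 ++ [(fields.getD 0 "", fields.getD 2 "", PySem.Str.strip (fields.getD 4 ""))],
           acc.2 ++ [fields.getD 4 ""])
        else acc) (rs, us)
      = (rs ++ recsOf content, us ++ usedOf content) := by
  induction content generalizing rs us with
  | nil => simp [recsOf, usedOf]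
  | cons line rest ih =>
    by_cases hl : 1 < PySem.Str.len line
    · have hl' : 1 < line.length := by simpa using hl
      simp only [List.foldl_cons, if_pos hl]
      rw [ih]
      simp [recsOf, usedOf, hl', lineRec, linePid, List.append_assoc]
    · have hl' : ¬ 1 < line.length := by simpa using hl
      simp only [List.foldl_cons, if_neg hl]
      rw [ih]
      simp [recsOf, usedOf, hl']

lemma B_eq (spA spB : String) (content : List String) :
    readSqlTable_alt content spA spB
      = ((groupRuns (recsOf content)).flatMap (emitG spA spB), usedOf content) := by
  simp only [readSqlTable_alt]
  rw [B_parse content [] []]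
  simp only [List.nil_append]
  rfl

-- ===== VERDICT (by name: the statement is the Claim_ definition above) =====
theorem readSqlTable_spec : Claim_equal_readSqlTable := by
  intro content spA spB _ _
  unfold Spec_readSqlTable
  rw [A_start spA spB content, B_eq spA spB content]
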